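-- pv_equiv track=rewrite | github.com/SanimYousuf/Pyhton-Practices-and-Assignments | Assignment 01/Problem-02.py | goodSequence
-- ===== SOURCE A (Python) =====
-- def goodSequence(N,a):
--     from collections import Counter
--
--     freq = Counter(a)
--     removals = 0
--
--     for x, count in freq.items():
--         if count < x:
--             removals += count
--         else:
--             removals += (count - x)
--
--     return removals
-- ===== SOURCE B (Python) =====
-- def goodSequence(N, a):
--     # Count the complement: how many elements can STAY (x copies of each value
--     # x that occurs at least x times), then return len(a) - kept.
--     s = sorted(a)
--     n = len(s)
--     kept = 0
--     i = 0
--     while i < n: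
--         x = s[i]
--         j = i + 1
--         while j < n and s[j] == x:
--             j += 1
--         if j - i >= x:
--             kept += x
--         i = j
--     return n - kept
-- ===== Notes on version B (the rewrite author's own statement) =====
-- stated objective: alternative
-- what changed: B counts the complement: after sorting, a two-pointer scan over equal runs tallies how many elements can STAY (x copies of each value x occurring at least x times) and returns len(a) - kept, instead of A's per-value removal branch over a Counter.
import Mathlib
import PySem

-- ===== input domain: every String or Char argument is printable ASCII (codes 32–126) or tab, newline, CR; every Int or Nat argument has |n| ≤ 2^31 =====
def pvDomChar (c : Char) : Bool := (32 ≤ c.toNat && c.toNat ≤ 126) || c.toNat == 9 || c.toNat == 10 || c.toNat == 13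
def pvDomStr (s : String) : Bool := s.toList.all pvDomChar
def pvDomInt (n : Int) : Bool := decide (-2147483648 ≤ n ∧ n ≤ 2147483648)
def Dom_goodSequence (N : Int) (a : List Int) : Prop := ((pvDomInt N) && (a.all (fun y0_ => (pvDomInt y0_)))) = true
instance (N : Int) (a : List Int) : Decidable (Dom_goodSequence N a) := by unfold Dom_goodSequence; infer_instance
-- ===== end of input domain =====

-- B counts the complement: after sorting, it scans equal runs and tallies how many
-- elements can STAY (x copies of each value x occurring at least x times), returning
-- len(a) - kept, instead of A's per-value removal branch over a Counter (alternative).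

-- ===== PORT A =====
def goodSequence (N : Int) (a : List Int) : Int :=
  let freq := PySem.Dict.counter a
  freq.items.foldl (fun removals xc =>
    if xc.2 < xc.1 then removals + xc.2 else removals + (xc.2 - xc.1)) 0

-- ===== PORT B =====
-- Source B's outer while loop: consume one maximal equal run per step; the inner
-- 'while j < n and s[j] == x' pointer advance measures the equal prefix of the
-- remaining suffix (takeWhile), and 'i = j' moves past it (dropWhile).
def gsKept (t : List Int) (kept : Int) : Int :=
  match t with
  | [] => kept
  | x :: r =>
    let run : Int := ((r.takeWhile (· == x)).length : Int) + 1
    gsKept (r.dropWhile (· == x)) (kept + (if x ≤ run then x else 0))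
termination_by t.length
decreasing_by
  simpa using Nat.lt_succ_of_le (List.length_dropWhile_le (· == x) r)

def goodSequence_alt (N : Int) (a : List Int) : Int :=
  let s := PySem.List.sorted a (fun x => x) false
  (s.length : Int) - gsKept s 0

-- ===== PRECONDITION & SPEC =====
def Spec_goodSequence (N : Int) (a : List Int) (out : Int) : Prop := out = goodSequence_alt N a
instance (N : Int) (a : List Int) (out : Int) : Decidable (Spec_goodSequence N a out) := by unfold Spec_goodSequence; infer_instance

-- ===== CLAIM (what is proved, stated in full; the proofs are below) =====
def Claim_equal_goodSequence : Prop := ∀ (N : Int) (a : List Int), Dom_goodSequence N a → Spec_goodSequence N a (goodSequence N a)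

-- ===== LEMMAS AND PROOFS =====

-- per-value removal contribution (A's branch)
def gsF (x c : Int) : Int := if c < x then c else c - x

-- A computes the sum of gsF over the distinct values of a with their counts
lemma goodSequence_eq_sum (N : Int) (a : List Int) :
    goodSequence N a = ((PySem.Set.ofList a).map (fun k => gsF k (a.count k))).sum := by
  show ((PySem.Dict.counter a).items).foldl (fun removals xc =>
      if xc.2 < xc.1 then removals + xc.2 else removals + (xc.2 - xc.1)) 0 = _
  rw [PySem.Dict.items_counter]
  rw [PySem.List.foldl_congr_mem
    (l := List.map (fun k => (k, ((List.count k a : Nat) : Int))) (PySem.Set.ofList a))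
    (init := (0 : Int))
    (f := fun (removals : Int) (xc : Int × Int) =>
      if xc.2 < xc.1 then removals + xc.2 else removals + (xc.2 - xc.1))
    (g := fun (removals : Int) (xc : Int × Int) => removals + gsF xc.1 xc.2)
    (by intro acc xc _; by_cases h : xc.2 < xc.1 <;> simp [gsF, h])]
  rw [PySem.List.foldl_add]
  simp [List.map_map, Function.comp_def]

-- Set.add onto an accumulator headed by an element not occurring later commutes with cons
lemma foldl_add_cons_head (l : List Int) (s : List Int) (x : Int) (hx : x ∉ l) :
    l.foldl PySem.Set.add (x :: s) = x :: l.foldl PySem.Set.add s := by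
  induction l generalizing s with
  | nil => rfl
  | cons y t ih =>
    have hyx : ¬(y = x) := by
      intro h; exact hx (by simp [h])
    simp only [List.foldl_cons]
    by_cases h : y ∈ s
    · have h1 : PySem.Set.add (x :: s) y = x :: s := by
        simp [PySem.Set.add, PySem.Set.contains, h]
      have h2 : PySem.Set.add s y = s := by
        simp [PySem.Set.add, PySem.Set.contains, h]
      rw [h1, h2]
      exact ih s (fun hm => hx (by simp [hm]))
    · have h1 : PySem.Set.add (x :: s) y = x :: (s ++ [y]) := by
        simp [PySem.Set.add, PySem.Set.contains, h, hyx]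
      have h2 : PySem.Set.add s y = s ++ [y] := by
        simp [PySem.Set.add, PySem.Set.contains, h]
      rw [h1, h2]
      exact ih (s ++ [y]) (fun hm => hx (by simp [hm]))

-- adding elements already in the accumulator is a no-op
lemma foldl_add_mem (l : List Int) (s : List Int) (h : ∀ y ∈ l, y ∈ s) :
    l.foldl PySem.Set.add s = s := by
  induction l with
  | nil => rfl
  | cons y t ih =>
    simp only [List.foldl_cons]
    have h1 : PySem.Set.add s y = s := by
      simp [PySem.Set.add, PySem.Set.contains, h y (by simp)]
    rw [h1]
    exact ih (fun z hz => h z (by simp [hz]))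

-- sortedness: everything x-bounded below gets past its own copies, never meets x again
lemma not_mem_dropWhile_sorted (t : List Int) (x : Int)
    (hp : t.Pairwise (· ≤ ·)) (hb : ∀ y ∈ t, x ≤ y) :
    x ∉ t.dropWhile (· == x) := by
  induction t with
  | nil => simp
  | cons h r ih =>
    by_cases hhx : h = x
    · subst hhx
      rw [List.dropWhile_cons_of_pos (by simp)]
      exact ih hp.tail (fun y hy => hb y (by simp [hy]))
    · rw [List.dropWhile_cons_of_neg (by simpa using hhx)]
      intro hm
      have hxh : x < h := lt_of_le_of_ne (hb h (by simp)) (fun e => hhx e.symm)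
      rcases List.mem_cons.mp hm with h1 | h2
      · exact hhx h1.symm
      · have := (List.pairwise_cons.mp hp).1 x h2
        omega

lemma count_takeWhile_run (t : List Int) (x : Int) :
    List.count x (t.takeWhile (· == x)) = (t.takeWhile (· == x)).length := by
  have : ∀ y ∈ t.takeWhile (· == x), y = x := by
    intro y hy
    exact eq_of_beq (List.mem_takeWhile_imp (p := fun z => z == x) (l := t) hy)
  rw [List.count_eq_length.mpr (fun y hy => ((this y hy).symm : x = y))]

-- main B-side invariant: on a sorted list, length minus the kept tally equals the
-- sum of A's per-value removal contributions over the distinct values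
lemma gsKept_eq_sum (s : List Int) (kept : Int) (hs : s.Pairwise (· ≤ ·)) :
    (s.length : Int) - gsKept s kept
      = ((PySem.List.dedup s).map (fun k => gsF k (s.count k))).sum - kept := by
  induction hn : s.length using Nat.strong_induction_on generalizing s kept with
  | _ n ih =>
  match s, hn with
  | [], hn0 =>
    have : n = 0 := by simpa using hn0.symm
    subst this
    simp [gsKept, PySem.List.dedup]
  | x :: t, hn =>
    have hbound : ∀ y ∈ t, x ≤ y := fun y hy => (List.pairwise_cons.mp hs).1 y hy
    have htp : t.Pairwise (· ≤ ·) := hs.tail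
    set tw := t.takeWhile (· == x) with htw
    set rest := t.dropWhile (· == x) with hrest
    have hsplit : tw ++ rest = t := List.takeWhile_append_dropWhile
    have hxrest : x ∉ rest := not_mem_dropWhile_sorted t x htp hbound
    have hrestp : rest.Pairwise (· ≤ ·) :=
      htp.sublist (hrest ▸ List.dropWhile_sublist _)
    have htwall : ∀ y ∈ tw, y = x := fun y hy =>
      eq_of_beq (List.mem_takeWhile_imp (p := fun z => z == x) (l := t) (htw ▸ hy))
    -- count of x in the whole list is the run length + 1
    have hcx : ((x :: t).count x : Int) = (tw.length : Int) + 1 := by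
      have h1 : (x :: t).count x = t.count x + 1 := by simp
      have h2 : t.count x = tw.count x + rest.count x := by
        rw [← hsplit, List.count_append]
      have h3 : rest.count x = 0 := List.count_eq_zero.mpr hxrest
      have h4 := count_takeWhile_run t x
      rw [← htw] at h4
      rw [h1, h2, h3, h4]
      push_cast
      ring
    -- dedup of the whole list is x followed by dedup of the remainder
    have hded : PySem.List.dedup (x :: t) = x :: PySem.List.dedup rest := by
      rw [PySem.List.dedup_eq_ofList, PySem.List.dedup_eq_ofList,
          PySem.Set.ofList_eq_foldl, PySem.Set.ofList_eq_foldl]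
      have h0 : PySem.Set.add ([] : List Int) x = [x] := by
        simp [PySem.Set.add, PySem.Set.contains]
      rw [List.foldl_cons, h0, ← hsplit, List.foldl_append]
      rw [foldl_add_mem tw [x] (by intro y hy; simp [htwall y hy])]
      exact foldl_add_cons_head rest [] x hxrest
    -- counts of surviving values agree between the whole list and the remainder
    have hcnt : ∀ y ∈ PySem.List.dedup rest, (x :: t).count y = rest.count y := by
      intro y hy
      have hyr : y ∈ rest := (PySem.List.mem_dedup rest y).mp hy
      have hyx : y ≠ x := fun e => hxrest (e ▸ hyr)
      have htwy : tw.count y = 0 := List.count_eq_zero.mpr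
        (fun hm => hyx (htwall y hm))
      rw [List.count_cons, ← hsplit, List.count_append, htwy]
      simp [Ne.symm hyx]
    have hlen : rest.length < n := by
      have h5 := List.length_dropWhile_le (· == x) t
      rw [← hrest] at h5
      have hn' : t.length + 1 = n := by simpa using hn
      omega
    have hlensum : ((x :: t).length : Int) = ((tw.length : Int) + 1) + (rest.length : Int) := by
      have : t.length = tw.length + rest.length := by
        rw [← hsplit, List.length_append]
      simp [this]
      ring
    rw [gsKept]
    simp only [← htw, ← hrest]
    set run : Int := (tw.length : Int) + 1 with hrun
    set k : Int := if x ≤ run then x else 0 with hk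
    have hgsF : gsF x run = run - k := by
      by_cases h : x ≤ run
      · simp [gsF, hk, h, not_lt.mpr h]
      · have : run < x := not_le.mp h
        simp [gsF, hk, h, this]
    have hIH := ih rest.length hlen rest (kept + k) hrestp rfl
    rw [hded]
    simp only [List.map_cons, List.sum_cons]
    rw [show (List.map (fun y => gsF y ((List.count y (x :: t) : Nat) : Int)) (PySem.List.dedup rest))
          = List.map (fun y => gsF y ((List.count y rest : Nat) : Int)) (PySem.List.dedup rest) from
        List.map_congr_left (fun y hy => by rw [hcnt y hy]), hcx]
    have hnint : (n : Int) = run + (rest.length : Int) := by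
      rw [← hn]; exact_mod_cast hlensum
    omega

theorem goodSequence_spec : Claim_equal_goodSequence := by
  intro N a _
  unfold Spec_goodSequence goodSequence_alt
  show _ = ((PySem.List.sorted a (fun x => x) false).length : Int)
      - gsKept (PySem.List.sorted a (fun x => x) false) 0
  rw [goodSequence_eq_sum]
  set s := PySem.List.sorted a (fun x => x) false with hs
  have hperm : s.Perm a := by rw [hs]; exact PySem.List.sorted_perm a (fun x => x) false
  have hsp : s.Pairwise (· ≤ ·) := by
    rw [hs]; simpa using PySem.List.sorted_pairwise a (fun x => x)
  have hmain := gsKept_eq_sum s 0 hsp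
  have hpd : (PySem.Set.ofList a).Perm (PySem.List.dedup s) := by
    rw [PySem.List.dedup_eq_ofList]
    refine (List.perm_ext_iff_of_nodup (PySem.Set.nodup_ofList a) (PySem.Set.nodup_ofList s)).mpr ?_
    intro y
    rw [PySem.Set.mem_ofList, PySem.Set.mem_ofList]
    exact ⟨fun h => hperm.mem_iff.mpr h, fun h => hperm.mem_iff.mp h⟩
  have hcnt : ∀ y, s.count y = a.count y := fun y => hperm.count_eq y
  have hsum : ((PySem.Set.ofList a).map (fun k => gsF k (a.count k))).sum
      = ((PySem.List.dedup s).map (fun k => gsF k ((s.count k : Int)))).sum := by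
    calc ((PySem.Set.ofList a).map (fun k => gsF k (a.count k))).sum
        = ((PySem.List.dedup s).map (fun k => gsF k ((a.count k : Int)))).sum :=
          (hpd.map (fun k => gsF k ((a.count k : Int)))).sum_eq
      _ = ((PySem.List.dedup s).map (fun k => gsF k ((s.count k : Int)))).sum := by
          rw [show List.map (fun k => gsF k ((a.count k : Int))) (PySem.List.dedup s)
                = List.map (fun k => gsF k ((s.count k : Int))) (PySem.List.dedup s) from
              List.map_congr_left (fun y _ => by rw [hcnt y])]
  rw [hsum]
  omega
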